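-- pv_equiv track=rewrite | github.com/adriansahlman/marsh | marsh/path.py | join_fields
-- ===== SOURCE A (Python) =====
-- from typing import (
--     Iterable,
--     Iterator,
--     NamedTuple,
--     Optional,
--     Sequence,
-- )
--
-- def escape_field(
--     field: str,
--     delimiter: str = '.',
-- ) -> str:
--     """Escape all delimiters and quotes found in a field.
--
--     This may be done to maintain the original field when it becomes
--     part of a path that is later split back into fields.
--
--     Arguments:
--         field: The field to escape characters in.
--         delimiter: The delimiter used.
--
--     Returns:
--         The escaped field.
--     """
--     chars = []
--     for char in field:
--         if char in ('"', "'", '\\', delimiter):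
--             chars.append('\\')
--         chars.append(char)
--     return ''.join(chars)
--
-- def join_fields(
--     fields: Iterable[str],
--     delimiter: str = '.',
-- ) -> str:
--     """Create a path from fields.
--
--     Arguments:
--         fields: The fields to create a path from.
--         delimiter: The delimiter to use in the path between fields.
--
--     Returns:
--         The path.
--     """
--     return delimiter.join(
--         escape_field(field, delimiter)
--         for field in filter(None, fields)
--     )
-- ===== SOURCE B (Python) =====
-- def join_fields(fields, delimiter='.'):
--     parts = []
--     for field in fields:
--         if not field:
--             continue
--         field = field.replace('\\', '\\\\').replace('"', '\\"').replace("'", "\\'")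
--         if len(delimiter) == 1 and delimiter not in '"\'\\':
--             field = field.replace(delimiter, '\\' + delimiter)
--         parts.append(field)
--     return delimiter.join(parts)
-- ===== Notes on version B (the rewrite author's own statement) =====
-- stated objective: alternative
-- what changed: Replaces the per-character escaping loop by staged whole-string str.replace passes (backslash first, then each quote, then the delimiter only when it is a fresh single character) and builds the joined parts with an explicit accumulator loop instead of a filtered generator.
import Mathlib
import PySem

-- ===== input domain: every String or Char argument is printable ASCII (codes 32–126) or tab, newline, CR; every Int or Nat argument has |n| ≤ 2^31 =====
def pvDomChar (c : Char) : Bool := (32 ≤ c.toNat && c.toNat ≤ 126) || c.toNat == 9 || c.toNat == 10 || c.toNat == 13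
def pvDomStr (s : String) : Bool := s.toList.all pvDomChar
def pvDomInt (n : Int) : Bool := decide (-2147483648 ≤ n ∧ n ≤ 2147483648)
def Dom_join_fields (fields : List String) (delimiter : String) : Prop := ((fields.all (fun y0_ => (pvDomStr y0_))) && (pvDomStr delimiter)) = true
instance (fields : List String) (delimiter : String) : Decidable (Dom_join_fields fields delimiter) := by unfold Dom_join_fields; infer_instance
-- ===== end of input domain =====

-- B replaces the per-character escaping loop by staged whole-string str.replace passes
-- (backslash first, then each quote, then a fresh single-char delimiter) over an
-- explicit accumulator loop; same cost, a different strategy.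

-- ===== PORT A =====
-- 'char in ('"', "'", '\\', delimiter)': char (a 1-char string) equals one of the quotes, the backslash, or the delimiter string
def escape_field (field : String) (delimiter : String) : String :=
  let chars : List Char := field.toList.foldl (fun chars char =>
    let chars := if char = '"' ∨ char = '\'' ∨ char = '\\' ∨ String.ofList [char] = delimiter
                 then chars ++ ['\\'] else chars
    chars ++ [char]) []
  String.ofList chars

def join_fields (fields : List String) (delimiter : String) : String :=
  PySem.Str.join delimiter
    ((fields.filter (fun field => field ≠ "")).map (fun field => escape_field field delimiter))

-- ===== PORT B =====
-- the chained field.replace(…) passes of Source B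
def bEscape (field : String) (delimiter : String) : String :=
  let f := PySem.Str.replace (PySem.Str.replace (PySem.Str.replace field "\\" "\\\\") "\"" "\\\"") "'" "\\'"
  if PySem.Str.len delimiter = 1 ∧ PySem.Str.isIn delimiter "\"'\\" = false
  then PySem.Str.replace f delimiter ("\\" ++ delimiter) else f

def join_fields_alt (fields : List String) (delimiter : String) : String :=
  let parts : List String := fields.foldl (fun parts field =>
    if field = "" then parts else parts ++ [bEscape field delimiter]) []
  PySem.Str.join delimiter parts

-- ===== PRECONDITION & SPEC =====
def Spec_join_fields (fields : List String) (delimiter : String) (out : String) : Prop := out = join_fields_alt fields delimiter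
instance (fields : List String) (delimiter : String) (out : String) : Decidable (Spec_join_fields fields delimiter out) := by unfold Spec_join_fields; infer_instance

-- ===== CLAIM (what is proved, stated in full; the proofs are below) =====
def Claim_equal_join_fields : Prop := ∀ (fields : List String) (delimiter : String), Dom_join_fields fields delimiter → Spec_join_fields fields delimiter (join_fields fields delimiter)

-- ===== LEMMAS AND PROOFS =====

-- PySem.Chars.replace with a single-char pattern is a flatMap
theorem go_single (c : Char) (new : List Char) :
    ∀ (l acc : List Char) (fuel : Nat), l.length ≤ fuel →
      PySem.Chars.replace.go [c] new fuel l acc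
        = acc.reverse ++ l.flatMap (fun x => if x = c then new else [x]) := by
  intro l
  induction l with
  | nil => intro acc fuel _; cases fuel <;> simp [PySem.Chars.replace.go]
  | cons x t ih =>
    intro acc fuel hf
    cases fuel with
    | zero => simp at hf
    | succ n =>
      simp only [PySem.Chars.replace.go]
      by_cases hx : x = c
      · subst hx
        have : List.isPrefixOf [x] (x :: t) = true := by simp [List.isPrefixOf]
        rw [if_pos this]
        simp only [List.length, List.drop_succ_cons, List.drop_zero]
        rw [ih _ n (by simpa using hf)]
        simp
      · have : List.isPrefixOf [c] (x :: t) = false := by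
          simp [List.isPrefixOf]; exact fun h => (hx h.symm).elim
        rw [if_neg (by simp [this])]
        rw [ih _ n (by simpa using hf)]
        simp [hx]

theorem replace_single (s : List Char) (c : Char) (new : List Char) :
    PySem.Chars.replace s [c] new = s.flatMap (fun x => if x = c then new else [x]) := by
  rw [PySem.Chars.replace]
  simp [go_single c new s [] s.length le_rfl]

-- A's foldl escape as a flatMap
theorem escape_field_flatMap (field : String) (delimiter : String) :
    (escape_field field delimiter).toList
      = field.toList.flatMap (fun c =>
          if c = '"' ∨ c = '\'' ∨ c = '\\' ∨ String.ofList [c] = delimiter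
          then ['\\', c] else [c]) := by
  unfold escape_field
  have h : ∀ (cs : List Char) (acc : List Char),
      cs.foldl (fun chars char =>
        let chars := if char = '"' ∨ char = '\'' ∨ char = '\\' ∨ String.ofList [char] = delimiter
                     then chars ++ ['\\'] else chars
        chars ++ [char]) acc
      = acc ++ cs.flatMap (fun c =>
          if c = '"' ∨ c = '\'' ∨ c = '\\' ∨ String.ofList [c] = delimiter
          then ['\\', c] else [c]) := by
    intro cs
    induction cs with
    | nil => intro acc; simp
    | cons c cs ih =>
      intro acc
      simp only [List.foldl_cons, List.flatMap_cons, ih]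
      by_cases hc : c = '"' ∨ c = '\'' ∨ c = '\\' ∨ String.ofList [c] = delimiter
      · rw [if_pos hc, if_pos hc]; simp
      · rw [if_neg hc, if_neg hc]; simp
  rw [h field.toList [], List.nil_append, String.toList_ofList]

-- single-char substring of "\"'\\" is membership
theorem isIn_quotes_iff (d : Char) :
    PySem.Chars.isIn [d] ['"', '\'', '\\'] = true ↔ (d = '"' ∨ d = '\'' ∨ d = '\\') := by
  rw [PySem.Chars.isIn_iff_infix]
  constructor
  · intro h
    have := h.mem (List.mem_singleton.mpr rfl)
    simpa using this
  · intro h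
    rcases h with h | h | h <;> subst h
    · exact ⟨[], ['\'', '\\'], rfl⟩
    · exact ⟨['"'], ['\\'], rfl⟩
    · exact ⟨['"', '\''], [], rfl⟩

-- B's staged replaces equal A's per-character escape
theorem bEscape_eq (field : String) (delimiter : String) :
    bEscape field delimiter = escape_field field delimiter := by
  have hlen : PySem.Str.len delimiter = delimiter.toList.length := by
    simp [PySem.Str.len]
  apply String.toList_injective
  rw [escape_field_flatMap]
  unfold bEscape
  by_cases hfresh : PySem.Str.len delimiter = 1 ∧ PySem.Str.isIn delimiter "\"'\\" = false
  · -- delimiter is a fresh single char d: four replace passes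
    obtain ⟨h1, h2⟩ := hfresh
    rw [hlen] at h1
    have h1' : delimiter.toList.length = 1 := by exact_mod_cast h1
    obtain ⟨d, hd⟩ := List.length_eq_one_iff.mp h1'
    have hdel : delimiter = String.ofList [d] := by
      have := congrArg String.ofList hd
      rwa [String.ofList_toList] at this
    have hdq : ¬ (d = '"' ∨ d = '\'' ∨ d = '\\') := by
      intro hc
      have : PySem.Chars.isIn [d] ['"', '\'', '\\'] = true := (isIn_quotes_iff d).mpr hc
      rw [PySem.Str.isIn_eq] at h2
      simp only [hd] at h2
      have hq : ("\"'\\" : String).toList = ['"', '\'', '\\'] := by decide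
      rw [hq] at h2
      rw [this] at h2; cases h2
    rw [if_pos ⟨by rw [hlen, h1], h2⟩]
    simp only [PySem.Str.toList_replace]
    have hq1 : ("\\" : String).toList = ['\\'] := by decide
    have hq2 : ("\\\\" : String).toList = ['\\', '\\'] := by decide
    have hq3 : ("\"" : String).toList = ['"'] := by decide
    have hq4 : ("\\\"" : String).toList = ['\\', '"'] := by decide
    have hq5 : ("'" : String).toList = ['\''] := by decide
    have hq6 : ("\\'" : String).toList = ['\\', '\''] := by decide
    have hq7 : ("\\" ++ delimiter).toList = ['\\', d] := by
      rw [String.toList_append, hq1, hd]; rfl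
    rw [hq1, hq2, hq3, hq4, hq5, hq6, hq7, hd,
        replace_single, replace_single, replace_single, replace_single,
        List.flatMap_assoc, List.flatMap_assoc, List.flatMap_assoc]
    apply List.flatMap_congr
    intro c _
    have hbd : ¬ ('\\' = d) := fun h => hdq (Or.inr (Or.inr h.symm))
    by_cases hc1 : c = '\\'
    · subst hc1
      simp [hbd, hdel]
    by_cases hc2 : c = '"'
    · subst hc2
      have hne : ¬ ('"' = d) := fun h => hdq (Or.inl h.symm)
      have hdd : String.ofList ['"'] = delimiter ↔ False := by
        rw [hdel]; constructor
        · intro h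
          have := congrArg String.toList h
          simp only [String.toList_ofList] at this
          exact hne (List.singleton_injective this)
        · exact False.elim
      simp [hc1, hne, hdd, hbd]
    by_cases hc3 : c = '\''
    · subst hc3
      have hne : ¬ ('\'' = d) := fun h => hdq (Or.inr (Or.inl h.symm))
      have hdd : String.ofList ['\''] = delimiter ↔ False := by
        rw [hdel]; constructor
        · intro h
          have := congrArg String.toList h
          simp only [String.toList_ofList] at this
          exact hne (List.singleton_injective this)
        · exact False.elim
      simp [hc1, hc2, hne, hdd, hbd]
    by_cases hc4 : c = d
    · subst hc4
      have hdd : String.ofList [c] = delimiter := hdel.symm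
      simp [hc1, hc2, hc3, hdd, hbd]
    · have hdd : ¬ (String.ofList [c] = delimiter) := by
        rw [hdel]; intro h
        have := congrArg String.toList h
        simp only [String.toList_ofList] at this
        exact hc4 (List.singleton_injective this)
      simp [hc1, hc2, hc3, hc4, hdd, hbd]
  · -- delimiter not a fresh single char: three replace passes
    rw [if_neg hfresh]
    simp only [PySem.Str.toList_replace]
    have hq1 : ("\\" : String).toList = ['\\'] := by decide
    have hq2 : ("\\\\" : String).toList = ['\\', '\\'] := by decide
    have hq3 : ("\"" : String).toList = ['"'] := by decide
    have hq4 : ("\\\"" : String).toList = ['\\', '"'] := by decide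
    have hq5 : ("'" : String).toList = ['\''] := by decide
    have hq6 : ("\\'" : String).toList = ['\\', '\''] := by decide
    rw [hq1, hq2, hq3, hq4, hq5, hq6,
        replace_single, replace_single, replace_single,
        List.flatMap_assoc, List.flatMap_assoc]
    apply List.flatMap_congr
    intro c _
    -- the skipped fourth pass can only matter when delimiter is a fresh single char
    have hdel : String.ofList [c] = delimiter → c = '"' ∨ c = '\'' ∨ c = '\\' := by
      intro h
      by_contra hq
      push Not at hq
      apply hfresh
      constructor
      · rw [hlen, ← h, String.toList_ofList]; rfl
      · rw [PySem.Str.isIn_eq, ← h, String.toList_ofList]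
        have hqs : ("\"'\\" : String).toList = ['"', '\'', '\\'] := by decide
        rw [hqs]
        rw [Bool.eq_false_iff]
        intro hc
        exact (by tauto : ¬ (c = '"' ∨ c = '\'' ∨ c = '\\')) ((isIn_quotes_iff c).mp hc)
    by_cases hc1 : c = '\\'
    · subst hc1; simp
    by_cases hc2 : c = '"'
    · subst hc2; simp [hc1]
    by_cases hc3 : c = '\''
    · subst hc3; simp [hc1, hc2]
    · have hdd : ¬ (String.ofList [c] = delimiter) := by
        intro h; rcases hdel h with h | h | h <;> tauto
      simp [hc1, hc2, hc3, hdd]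

-- B's accumulator loop equals A's filter-map
theorem parts_eq (fields : List String) (delimiter : String) :
    fields.foldl (fun parts field =>
        if field = "" then parts else parts ++ [bEscape field delimiter]) []
      = (fields.filter (fun field => field ≠ "")).map (fun field => escape_field field delimiter) := by
  have h : ∀ (fs : List String) (acc : List String),
      fs.foldl (fun parts field =>
        if field = "" then parts else parts ++ [bEscape field delimiter]) acc
      = acc ++ (fs.filter (fun field => field ≠ "")).map (fun field => escape_field field delimiter) := by
    intro fs
    induction fs with
    | nil => intro acc; simp
    | cons f fs ih =>
      intro acc
      simp only [List.foldl_cons, ih]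
      by_cases hf : f = ""
      · simp [hf]
      · simp [hf, bEscape_eq]
  simpa using h fields []

-- ===== VERDICT (by name: the statement is the Claim_ definition above) =====
theorem join_fields_spec : Claim_equal_join_fields := by
  intro fields delimiter _
  unfold Spec_join_fields join_fields join_fields_alt
  rw [parts_eq]
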